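-- pv_equiv track=rewrite | github.com/nadineelnaggar/Counters | GenerateLongDatasets.py | get_timestep_depths
-- ===== SOURCE A (Python) =====
-- def get_timestep_depths(x):
--     max_depth=0
--     current_depth=0
--     timestep_depths = []
--     for i in range(len(x)):
--
--         if x[i] == '(':
--             current_depth += 1
--             timestep_depths.append(current_depth)
--             if current_depth > max_depth:
--                 max_depth = current_depth
--         elif x[i] == ')':
--             current_depth -= 1
--             timestep_depths.append(current_depth)
--     return timestep_depths
-- ===== SOURCE B (Python) =====
-- def get_timestep_depths(x):
--     bs = [c for c in x if c in '()']
--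
--     def depths(lo, hi):
--         # depths of bs[lo:hi] measured from a starting depth of 0
--         if hi - lo == 0:
--             return []
--         if hi - lo == 1:
--             return [1 if bs[lo] == '(' else -1]
--         mid = (lo + hi) // 2
--         left = depths(lo, mid)
--         off = left[-1]
--         return left + [d + off for d in depths(mid, hi)]
--
--     return depths(0, len(bs))
-- ===== Notes on version B (the rewrite author's own statement) =====
-- stated objective: alternative
-- what changed: Replaces the stateful left-to-right counter loop by a divide-and-conquer: filter to bracket characters, recursively compute the depth sequences of the two halves independently, and merge by shifting the right half by the left half's final depth.
import Mathlib
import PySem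

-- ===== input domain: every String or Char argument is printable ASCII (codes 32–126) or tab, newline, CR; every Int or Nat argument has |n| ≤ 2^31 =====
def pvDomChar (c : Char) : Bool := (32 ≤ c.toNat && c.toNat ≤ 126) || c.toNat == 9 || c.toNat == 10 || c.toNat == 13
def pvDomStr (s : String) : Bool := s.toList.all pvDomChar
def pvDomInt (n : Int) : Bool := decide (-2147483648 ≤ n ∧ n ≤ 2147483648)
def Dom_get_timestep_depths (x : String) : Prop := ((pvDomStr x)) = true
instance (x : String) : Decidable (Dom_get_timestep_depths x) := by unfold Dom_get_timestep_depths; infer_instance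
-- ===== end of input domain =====

-- B replaces A's stateful counter loop (with its unused max_depth) by a
-- divide-and-conquer on the filtered bracket list: halves are solved
-- independently and the right half's depths are shifted by the left's last depth.

-- ===== PORT A =====
-- literal transliteration of A's loop body: state (max_depth, current_depth, timestep_depths)
def pvStepA (st : Int × Int × List Int) (c : Char) : Int × Int × List Int :=
  let maxd := st.1
  let cur := st.2.1
  let ts := st.2.2
  if c = '(' then
    let cur' := cur + 1
    let ts' := ts ++ [cur']
    let maxd' := if cur' > maxd then cur' else maxd
    (maxd', cur', ts')
  else if c = ')' then
    (maxd, cur - 1, ts ++ [cur - 1])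
  else st

def get_timestep_depths (x : String) : List Int :=
  (x.toList.foldl pvStepA ((0 : Int), (0 : Int), ([] : List Int))).2.2

-- ===== PORT B =====
-- divide and conquer over the bracket list (Python's depths(lo,hi) on bs,
-- rendered with take/drop at the same midpoint; bs[lo] of the singleton is its head,
-- left[-1] is getLastD since left is nonempty there)
def pvDC (bs : List Char) : List Int :=
  if _h0 : bs.length = 0 then []
  else if _h1 : bs.length = 1 then
    [if bs.headD ' ' = '(' then (1 : Int) else -1]
  else
    let mid := bs.length / 2
    let left := pvDC (bs.take mid)
    let off := left.getLastD 0
    left ++ (pvDC (bs.drop mid)).map (fun d => d + off)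
termination_by bs.length
decreasing_by
  · simp; omega
  · simp; omega

def get_timestep_depths_alt (x : String) : List Int :=
  pvDC (x.toList.filter (fun c => c = '(' || c = ')'))

-- ===== PRECONDITION & SPEC =====
def Spec_get_timestep_depths (x : String) (out : List Int) : Prop := out = get_timestep_depths_alt x
instance (x : String) (out : List Int) : Decidable (Spec_get_timestep_depths x out) := by unfold Spec_get_timestep_depths; infer_instance

-- ===== CLAIM (what is proved, stated in full; the proofs are below) =====
def Claim_equal_get_timestep_depths : Prop := ∀ (x : String), Dom_get_timestep_depths x → Spec_get_timestep_depths x (get_timestep_depths x)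

-- ===== LEMMAS AND PROOFS =====

-- running prefix sums starting from s (the common characterisation of both programs)
def pvAccum (s : Int) : List Int → List Int
  | [] => []
  | d :: ds => (s + d) :: pvAccum (s + d) ds

def pvd (c : Char) : Int := if c = '(' then 1 else -1

theorem pv_loop_eq (cs : List Char) : ∀ (maxd cur : Int) (ts : List Int),
    (cs.foldl pvStepA (maxd, cur, ts)).2.2
    = ts ++ pvAccum cur (cs.filter (fun c => c = '(' || c = ')') |>.map pvd) := by
  induction cs with
  | nil => intro maxd cur ts; simp [pvAccum]
  | cons c cs ih =>
    intro maxd cur ts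
    rw [List.foldl_cons]
    by_cases h1 : c = '('
    · have hs : pvStepA (maxd, cur, ts) c
          = (if cur + 1 > maxd then cur + 1 else maxd, cur + 1, ts ++ [cur + 1]) := by
        simp [pvStepA, h1]
      rw [hs, ih]
      simp [h1, pvd, pvAccum]
    · by_cases h2 : c = ')'
      · have hs : pvStepA (maxd, cur, ts) c = (maxd, cur - 1, ts ++ [cur - 1]) := by
          simp [pvStepA, h2]
        rw [hs, ih]
        simp [h2, pvd, pvAccum, sub_eq_add_neg]
      · have hs : pvStepA (maxd, cur, ts) c = (maxd, cur, ts) := by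
          simp [pvStepA, h1, h2]
        rw [hs, ih]
        simp [h1, h2]

theorem pvAccum_shift (ds : List Int) : ∀ (s : Int),
    pvAccum s ds = (pvAccum 0 ds).map (fun d => d + s) := by
  induction ds with
  | nil => intro s; simp [pvAccum]
  | cons d ds ih =>
    intro s
    simp only [pvAccum, List.map_cons, zero_add]
    rw [ih (s + d), ih d, List.map_map]
    congr 1
    · omega
    · apply List.map_congr_left
      intro a _
      simp only [Function.comp_apply]
      omega

theorem pvAccum_append (a b : List Int) : ∀ (s : Int),
    pvAccum s (a ++ b) = pvAccum s a ++ pvAccum (s + a.sum) b := by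
  induction a with
  | nil => intro s; simp [pvAccum]
  | cons d a ih =>
    intro s
    simp only [List.cons_append, pvAccum, ih (s + d), List.sum_cons]
    have h : s + d + a.sum = s + (d + a.sum) := by omega
    rw [h]

theorem pvAccum_last (ds : List Int) : ∀ (s : Int),
    (pvAccum s ds).getLastD s = s + ds.sum := by
  induction ds with
  | nil => intro s; simp [pvAccum]
  | cons d ds ih =>
    intro s
    simp only [pvAccum, List.getLastD_cons, ih (s + d), List.sum_cons]
    omega

theorem pvDC_eq (bs : List Char) : pvDC bs = pvAccum 0 (bs.map pvd) := by
  fun_induction pvDC bs with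
  | case1 bs h0 =>
    have : bs = [] := List.eq_nil_of_length_eq_zero h0
    subst this; simp [pvAccum]
  | case2 bs h0 h1 =>
    match bs, h1 with
    | [c], _ => simp [pvAccum, pvd]
  | case3 bs h0 h1 mid left off ihl ihr =>
    simp only [mid, left, off, ihl, ihr]
    have hoff : (pvAccum 0 ((bs.take (bs.length / 2)).map pvd)).getLastD 0
        = ((bs.take (bs.length / 2)).map pvd).sum := by
      have h := pvAccum_last ((bs.take (bs.length / 2)).map pvd) 0
      omega
    rw [hoff, ← pvAccum_shift, ← zero_add (((bs.take (bs.length / 2)).map pvd).sum),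
        ← pvAccum_append, ← List.map_append, List.take_append_drop]

-- ===== VERDICT (by name: the statement is the Claim_ definition above) =====
theorem get_timestep_depths_spec : Claim_equal_get_timestep_depths := by
  intro x _
  show _ = _
  rw [get_timestep_depths, get_timestep_depths_alt, pv_loop_eq, pvDC_eq]
  simp
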